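-- pv_equiv track=rewrite | github.com/HuanPm/mlp_assignment4 | preprocess_data.py | auc_onehot
-- ===== SOURCE A (Python) =====
-- def auc_onehot_openpass(auc):
--     process_len = min(3,len(auc))
--     open_pass = '0'*3
--     openpass_len = 0
--     for i in range(process_len):
--         if auc[i] == 'Pass':
--             open_pass = open_pass[:i]+'1'+open_pass[i+1:]
--             openpass_len = i
--         else:
--             openpass_len = i
--             break
--     return open_pass,openpass_len
--
-- def auc_onehot_contrs(auc_contrs):
--     leng = len(auc_contrs)
--     contrs = '0'* 8
--     non_contrs = {
--         0:'Pass',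
--         1:'Pass',
--         2:'X',
--         3:'Pass',
--         4:'Pass',
--         5:'XX',
--         6:'Pass',
--         7:'Pass'
--     }
--     k = 0
--     for i in range(leng-1):
--         for j in range(k,8):
--             if auc_contrs[i+1] == non_contrs[j]:
--                 contrs = contrs[:j] + '1' + contrs[j+1:]
--                 k = j+1
--                 break
--     contrs = '1'+contrs
--     return contrs
--
-- def auc_split(auc):
--     _,openpass_len = auc_onehot_openpass(auc)
--
--     auc_cut = auc[openpass_len:]
--     auc_cut_len = len(auc_cut)
--     split = []
--     start = 0
--     for i in range(1,auc_cut_len):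
--         if auc_cut[i][0].isdigit():
--             split.append(list(auc_cut[start:i]))
--             start = i
--     if auc_cut[start:] != []:
--         split.append(auc_cut[start:])
--     return split
--
-- def auc_onehot(auc):
--     auc_len = len(auc)
--     open_pass,_ = auc_onehot_openpass(auc)
--     split = auc_split(auc)
--     level = [str(i) for i in range(1,8) for j in range(5)]
--     suit = ['C', 'D', 'H', 'S', 'NT']*7
--     suit_level = [level[i]+suit[i] for i in range(35)]
--     j = 0
--     onehot = open_pass
--     for i in range(35):
--         if j >= len(split):
--             break
--         if split[j][0] == suit_level[i]:
--             onehot += auc_onehot_contrs(split[j])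
--             j += 1
--         else:
--             onehot += '0' * 9
--     if len(onehot)< 318:
--         onehot = onehot + '0'* (318-len(onehot))
--     return onehot
-- ===== SOURCE B (Python) =====
-- _SUIT_LEVELS = [str(l) + s for l in range(1, 8) for s in ('C', 'D', 'H', 'S', 'NT')]
-- _SL_INDEX = {sl: i for i, sl in enumerate(_SUIT_LEVELS)}
--
--
-- def _encode_group(group):
--     # greedy match of the group's tail against the pattern Pass Pass X Pass Pass XX Pass Pass,
--     # expressed arithmetically instead of scanning an 8-slot table
--     bits = ['0'] * 8
--     k = 0
--     for t in group[1:]: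
--         if t == 'Pass':
--             p = k + 1 if k == 2 or k == 5 else k
--             if p < 8:
--                 bits[p] = '1'
--                 k = p + 1
--         elif t == 'X':
--             if k <= 2:
--                 bits[2] = '1'
--                 k = 3
--         elif t == 'XX':
--             if k <= 5:
--                 bits[5] = '1'
--                 k = 6
--     return '1' + ''.join(bits)
--
--
-- def auc_onehot(auc):
--     # opening passes: consume up to the first min(3, len) tokens
--     opening = ['0', '0', '0']
--     op_len = 0
--     for i in range(min(3, len(auc))):
--         op_len = i
--         if auc[i] != 'Pass':
--             break
--         opening[i] = '1'
--     rest = auc[op_len:]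
--     # single forward walk over the remaining tokens: groups are closed at each
--     # digit-leading token, looked up in the suit-level index, and emitted with
--     # the zero-padding for the skipped grid slots
--     parts = [''.join(opening)]
--     cur = 0
--     if rest:
--         g = 0
--         for i in range(1, len(rest) + 1):
--             if i == len(rest) or rest[i][0].isdigit():
--                 idx = _SL_INDEX.get(rest[g], -1)
--                 if idx < cur:
--                     break
--                 parts.append('0' * (9 * (idx - cur)))
--                 parts.append(_encode_group(rest[g:i]))
--                 cur = idx + 1
--                 g = i
--     s = ''.join(parts)
--     return s + '0' * (318 - len(s))
-- ===== Notes on version B (the rewrite author's own statement) =====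
-- stated objective: alternative
-- what changed: B replaces A's three-phase pipeline (index/slice-based split into groups, then a 35-slot grid scan matching groups against the suit-level list, then conditional padding) by a single forward walk over the post-opening tokens that closes groups on the fly, looks each group head up in a precomputed suit-level index dict, emits the skipped grid slots as zeros directly, and encodes each group's contributions arithmetically (position formula per token kind) instead of rescanning an 8-slot table.
import Mathlib
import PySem

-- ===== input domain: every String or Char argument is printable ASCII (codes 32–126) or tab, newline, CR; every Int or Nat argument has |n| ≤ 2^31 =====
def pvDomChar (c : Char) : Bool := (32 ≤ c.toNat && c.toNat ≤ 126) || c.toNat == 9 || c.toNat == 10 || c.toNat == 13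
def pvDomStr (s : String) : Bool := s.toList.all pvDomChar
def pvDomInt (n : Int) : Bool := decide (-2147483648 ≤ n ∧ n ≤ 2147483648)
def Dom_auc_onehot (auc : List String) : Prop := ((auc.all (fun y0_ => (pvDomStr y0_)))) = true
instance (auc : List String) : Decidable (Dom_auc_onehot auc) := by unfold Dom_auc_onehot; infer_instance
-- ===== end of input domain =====

-- B replaces A's split-then-35-slot-grid-scan by a single forward walk with an index lookup
-- and an arithmetic contribution encoder (objective: alternative decomposition, same cost).

-- shared primitive: Python `s[0].isdigit()` — first-char digit test, exact for ASCII strings;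
-- returns false on "" where Python raises IndexError (such inputs are excluded by Pre_)
def pvDigitHead (s : String) : Bool :=
  match s.toList with
  | [] => false
  | c :: _ => c.isDigit

-- ===== PORT A =====
-- loop of auc_onehot_openpass: `open_pass[:i]+'1'+open_pass[i+1:]` kept as take/cons/drop
def pvAOpenLoop (auc : List String) (pl i : Nat) (op : List Char) (olen : Nat) : List Char × Nat :=
  if h : i < pl then
    if auc.getD i "" = "Pass" then
      pvAOpenLoop auc pl (i+1) (op.take i ++ '1' :: op.drop (i+1)) i
    else (op, i)
  else (op, olen)
termination_by pl - i

def pvAOpen (auc : List String) : List Char × Nat :=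
  pvAOpenLoop auc (min 3 auc.length) 0 (List.replicate 3 '0') 0

-- the non_contrs dict of auc_onehot_contrs (only ever read at keys 0..7)
def pvNonContrs (j : Nat) : String :=
  match j with
  | 2 => "X"
  | 5 => "XX"
  | _ => "Pass"

-- inner `for j in range(k,8)` scan of auc_onehot_contrs (returns updated contrs and k)
def pvAContrsInner (t : String) (j : Nat) (contrs : List Char) (k : Nat) : List Char × Nat :=
  if h : j < 8 then
    if t = pvNonContrs j then (contrs.take j ++ '1' :: contrs.drop (j+1), j+1)
    else pvAContrsInner t (j+1) contrs k
  else (contrs, k)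
termination_by 8 - j

-- auc_onehot_contrs (as List Char; `for i in range(leng-1)` reads auc_contrs[i+1], i.e. the tail)
def pvAContrs (g : List String) : List Char :=
  let st := (g.drop 1).foldl (fun st t => pvAContrsInner t st.2 st.1 st.2) (List.replicate 8 '0', 0)
  '1' :: st.1

-- loop of auc_split; Python slice auc_cut[start:i] (start ≤ i in range) = (drop start).take (i-start)
def pvASplitLoop (cut : List String) (n i start : Nat) (split : List (List String)) : List (List String) × Nat :=
  if h : i < n then
    if pvDigitHead (cut.getD i "") then
      pvASplitLoop cut n (i+1) i (split ++ [(cut.drop start).take (i - start)])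
    else pvASplitLoop cut n (i+1) start split
  else (split, start)
termination_by n - i

def pvASplit (auc : List String) : List (List String) :=
  let cut := auc.drop (pvAOpen auc).2
  let res := pvASplitLoop cut cut.length 1 0 []
  if cut.drop res.2 ≠ [] then res.1 ++ [cut.drop res.2] else res.1

-- level = [str(i) for i in range(1,8) for j in range(5)]
def pvALevel : List String :=
  (PySem.List.pyRange 1 8 1).flatMap (fun i => (PySem.List.pyRange 0 5 1).map (fun _ => PySem.Int.toStr i))
-- suit = ['C','D','H','S','NT']*7
def pvASuit : List String := (List.replicate 7 (["C", "D", "H", "S", "NT"] : List String)).flatten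
-- suit_level = [level[i]+suit[i] for i in range(35)]
def pvASuitLevel : List String :=
  (List.range 35).map (fun i => pvALevel.getD i "" ++ pvASuit.getD i "")

-- the `for i in range(35)` grid scan of auc_onehot (with the j >= len(split) break)
def pvAGrid (split : List (List String)) (sl : List String) (i j : Nat) (onehot : List Char) : List Char :=
  if h : i < 35 then
    if j < split.length then
      if (split.getD j []).getD 0 "" = sl.getD i "" then
        pvAGrid split sl (i+1) (j+1) (onehot ++ pvAContrs (split.getD j []))
      else
        pvAGrid split sl (i+1) j (onehot ++ List.replicate 9 '0')
    else onehot
  else onehot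
termination_by 35 - i

def auc_onehot (auc : List String) : String :=
  let op := (pvAOpen auc).1
  let split := pvASplit auc
  let onehot := pvAGrid split pvASuitLevel 0 0 op
  String.ofList (if onehot.length < 318 then onehot ++ List.replicate (318 - onehot.length) '0' else onehot)

-- ===== PORT B =====
-- _SUIT_LEVELS = [str(l)+s for l in range(1,8) for s in ('C','D','H','S','NT')]
def pvBSuitLevels : List String :=
  (PySem.List.pyRange 1 8 1).flatMap
    (fun l => (["C", "D", "H", "S", "NT"] : List String).map (fun s => PySem.Int.toStr l ++ s))

-- _SL_INDEX.get(t, -1): the enumerate-dict has distinct keys, so it is the index lookup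
def pvBSLIndex (t : String) : Int :=
  match pvBSuitLevels.idxOf? t with
  | some m => (m : Int)
  | none => -1

-- one step of _encode_group's loop over group[1:] (state: bits, k)
def pvBEncStep (st : List Char × Nat) (t : String) : List Char × Nat :=
  if t = "Pass" then
    let p := if st.2 = 2 ∨ st.2 = 5 then st.2 + 1 else st.2
    if p < 8 then (st.1.set p '1', p + 1) else st
  else if t = "X" then
    if st.2 ≤ 2 then (st.1.set 2 '1', 3) else st
  else if t = "XX" then
    if st.2 ≤ 5 then (st.1.set 5 '1', 6) else st
  else st

def pvBEnc (g : List String) : List Char :=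
  '1' :: ((g.drop 1).foldl pvBEncStep (List.replicate 8 '0', 0)).1

-- the single forward walk `for i in range(1, len(rest)+1)`; rest[g:i] = (drop g).take (i-g)
def pvBWalk (rest : List String) (i g : Nat) (cur : Int) (parts : List Char) : List Char :=
  if h : i < rest.length + 1 then
    if i = rest.length ∨ pvDigitHead (rest.getD i "") then
      let idx := pvBSLIndex (rest.getD g "")
      if idx < cur then parts
      else pvBWalk rest (i+1) i (idx + 1)
        (parts ++ List.replicate (9 * (idx - cur).toNat) '0' ++ pvBEnc ((rest.drop g).take (i - g)))
    else pvBWalk rest (i+1) g cur parts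
  else parts
termination_by rest.length + 1 - i

-- B's opening-pass loop (list of chars mutated with bits[i] = '1')
def pvBOpenLoop (auc : List String) (pl i : Nat) (opening : List Char) (olen : Nat) : List Char × Nat :=
  if h : i < pl then
    if auc.getD i "" = "Pass" then pvBOpenLoop auc pl (i+1) (opening.set i '1') i
    else (opening, i)
  else (opening, olen)
termination_by pl - i

def auc_onehot_alt (auc : List String) : String :=
  let o := pvBOpenLoop auc (min 3 auc.length) 0 (List.replicate 3 '0') 0
  let rest := auc.drop o.2
  let body := if rest ≠ [] then pvBWalk rest 1 0 0 [] else []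
  let s := o.1 ++ body
  String.ofList (s ++ List.replicate (318 - s.length) '0')

-- ===== PRECONDITION & SPEC =====
-- closed form of A's opening-pass cut index: leading-'Pass' count capped at min(3, len) - 1
def pvOpenLen (auc : List String) : Nat :=
  min (auc.takeWhile (fun t => t == "Pass")).length (min 3 auc.length - 1)

-- Pre_ excludes exactly the inputs on which Python A raises IndexError: an empty-string token
-- at a position strictly after the opening-pass cut index (auc_split evaluates token[0] there).
def Pre_auc_onehot (auc : List String) : Prop :=
  ((auc.drop (pvOpenLen auc + 1)).all (fun t => !(t == ""))) = true
instance (auc : List String) : Decidable (Pre_auc_onehot auc) := by unfold Pre_auc_onehot; infer_instance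

def pvWitness_auc_onehot : List String := ["Pass", "1C", "Pass", "X", "2NT"]

def Spec_auc_onehot (auc : List String) (out : String) : Prop := out = auc_onehot_alt auc
instance (auc : List String) (out : String) : Decidable (Spec_auc_onehot auc out) := by unfold Spec_auc_onehot; infer_instance

-- ===== CLAIM (what is proved, stated in full; the proofs are below) =====
def Claim_equal_auc_onehot : Prop := ∀ (auc : List String), Dom_auc_onehot auc → Pre_auc_onehot auc → Spec_auc_onehot auc (auc_onehot auc)

-- ===== LEMMAS AND PROOFS =====

-- proof-side: grouping of the post-opening tokens with an explicit pending group
def pvGrp (pending : List String) (ts : List String) : List (List String) :=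
  match ts with
  | [] => [pending]
  | t :: ts' => if pvDigitHead t then pending :: pvGrp [t] ts' else pvGrp (pending ++ [t]) ts'

-- proof-side: the group-by-group emission both programs compute
def pvFB (gs : List (List String)) (cur : Int) : List Char :=
  match gs with
  | [] => []
  | g :: gs' =>
    let idx := pvBSLIndex (g.getD 0 "")
    if idx < cur then []
    else List.replicate (9 * (idx - cur).toNat) '0' ++ pvBEnc g ++ pvFB gs' (idx + 1)

lemma pvSL_len : pvBSuitLevels.length = 35 := by decide

lemma pvSL_nodup : pvBSuitLevels.Nodup := by decide

lemma pvASL_eq : pvASuitLevel = pvBSuitLevels := by decide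

lemma openLoop_eq (auc : List String) (pl : Nat) :
    ∀ fuel i op olen, pl - i ≤ fuel → pl ≤ op.length →
      pvAOpenLoop auc pl i op olen = pvBOpenLoop auc pl i op olen := by
  intro fuel
  induction fuel with
  | zero =>
    intro i op olen hf _
    rw [pvAOpenLoop, pvBOpenLoop]
    have : ¬ i < pl := by omega
    simp [this]
  | succ n ih =>
    intro i op olen hf hl
    rw [pvAOpenLoop, pvBOpenLoop]
    by_cases hip : i < pl
    · simp only [hip, dif_pos]
      by_cases hp : auc.getD i "" = "Pass"
      · simp only [hp, if_pos]
        rw [← List.set_eq_take_cons_drop '1' (by omega : i < op.length)]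
        exact ih (i+1) (op.set i '1') i (by omega) (by simp [hl])
      · rw [if_neg hp, if_neg hp]
    · simp [hip]

lemma openLoop_len (auc : List String) (pl : Nat) :
    ∀ fuel i op olen, pl - i ≤ fuel → pl ≤ op.length →
      (pvBOpenLoop auc pl i op olen).1.length = op.length := by
  intro fuel
  induction fuel with
  | zero =>
    intro i op olen hf _
    rw [pvBOpenLoop]
    have : ¬ i < pl := by omega
    simp [this]
  | succ n ih =>
    intro i op olen hf hl
    rw [pvBOpenLoop]
    by_cases hip : i < pl
    · simp only [hip, dif_pos]
      by_cases hp : auc.getD i "" = "Pass"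
      · simp only [hp, if_pos]
        rw [ih (i+1) (op.set i '1') i (by omega) (by simp [hl])]
        simp
      · rw [if_neg hp]
    · simp [hip]

lemma encStep_eq (t : String) (bits : List Char) (k : Nat) (hl : bits.length = 8) (hk : k ≤ 8) :
    pvAContrsInner t k bits k = pvBEncStep (bits, k) t := by
  by_cases h1 : t = "Pass"
  · subst h1
    interval_cases k <;>
      simp [pvAContrsInner, pvBEncStep, pvNonContrs, List.set_eq_take_cons_drop, hl]
  · by_cases h2 : t = "X"
    · subst h2
      interval_cases k <;>
        simp [pvAContrsInner, pvBEncStep, pvNonContrs, List.set_eq_take_cons_drop, hl]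
    · by_cases h3 : t = "XX"
      · subst h3
        interval_cases k <;>
          simp [pvAContrsInner, pvBEncStep, pvNonContrs, List.set_eq_take_cons_drop, hl]
      · interval_cases k <;>
          simp [pvAContrsInner, pvBEncStep, pvNonContrs, h1, h2, h3]

lemma encStep_inv (t : String) (st : List Char × Nat) (hl : st.1.length = 8) (hk : st.2 ≤ 8) :
    (pvBEncStep st t).1.length = 8 ∧ (pvBEncStep st t).2 ≤ 8 := by
  obtain ⟨bits, k⟩ := st
  simp only [pvBEncStep]
  split_ifs <;> simp_all <;> omega

lemma encFold_eq : ∀ (ts : List String) (st : List Char × Nat), st.1.length = 8 → st.2 ≤ 8 →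
    ts.foldl (fun st t => pvAContrsInner t st.2 st.1 st.2) st = ts.foldl pvBEncStep st := by
  intro ts
  induction ts with
  | nil => intro st _ _; rfl
  | cons t ts ih =>
    intro st hl hk
    obtain ⟨bits, k⟩ := st
    simp only [List.foldl_cons]
    rw [encStep_eq t bits k hl hk]
    exact ih _ (encStep_inv t (bits, k) hl hk).1 (encStep_inv t (bits, k) hl hk).2

lemma encFold_len : ∀ (ts : List String) (st : List Char × Nat), st.1.length = 8 → st.2 ≤ 8 →
    (ts.foldl pvBEncStep st).1.length = 8 := by
  intro ts
  induction ts with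
  | nil => intro st hl _; exact hl
  | cons t ts ih =>
    intro st hl hk
    simp only [List.foldl_cons]
    exact ih _ (encStep_inv t st hl hk).1 (encStep_inv t st hl hk).2

lemma enc_eq (g : List String) : pvAContrs g = pvBEnc g := by
  simp only [pvAContrs, pvBEnc]
  rw [encFold_eq (g.drop 1) (List.replicate 8 '0', 0) (by simp) (by simp)]

lemma enc_len (g : List String) : (pvBEnc g).length = 9 := by
  simp only [pvBEnc, List.length_cons]
  rw [encFold_len (g.drop 1) (List.replicate 8 '0', 0) (by simp) (by simp)]

lemma sl_getD (k : Nat) (h : k < 35) :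
    pvBSuitLevels.getD k "" = pvBSuitLevels[k]'(by rw [pvSL_len]; exact h) := by
  rw [List.getD_eq_getElem?_getD, List.getElem?_eq_getElem (by rw [pvSL_len]; exact h)]
  rfl

lemma slidx_some {t : String} {m : Nat} (h : pvBSuitLevels.idxOf? t = some m) :
    m < 35 ∧ pvBSuitLevels.getD m "" = t ∧ ∀ k, k < m → pvBSuitLevels.getD k "" ≠ t := by
  obtain ⟨hm, hget, hmin⟩ := List.idxOf?_eq_some_iff.mp h
  have hm35 : m < 35 := by rw [← pvSL_len]; exact hm
  refine ⟨hm35, by rw [sl_getD m hm35]; exact hget, fun k hk => ?_⟩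
  rw [sl_getD k (by omega)]
  exact hmin k hk

lemma slidx_none {t : String} (h : pvBSuitLevels.idxOf? t = none) :
    ∀ k, k < 35 → pvBSuitLevels.getD k "" ≠ t := by
  intro k hk he
  rw [sl_getD k hk] at he
  exact List.idxOf?_eq_none_iff.mp h (he ▸ List.getElem_mem _)

lemma slice_head (l : List String) (g i : Nat) (h1 : g < i) (h2 : i ≤ l.length) :
    ((l.drop g).take (i - g)).getD 0 "" = l.getD g "" := by
  have hg : g < l.length := by omega
  rw [List.drop_eq_getElem_cons hg]
  have : i - g = (i - g - 1) + 1 := by omega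
  rw [this, List.take_succ_cons]
  rw [List.getD_cons_zero, List.getD_eq_getElem?_getD, List.getElem?_eq_getElem hg]
  rfl

lemma slice_extend (l : List String) (g i : Nat) (h1 : g ≤ i) (h2 : i < l.length) :
    (l.drop g).take (i + 1 - g) = (l.drop g).take (i - g) ++ [l.getD i ""] := by
  have : i + 1 - g = (i - g) + 1 := by omega
  rw [this, List.take_add_one]
  congr 1
  rw [List.getElem?_drop]
  have hig : g + (i - g) = i := by omega
  rw [hig, List.getElem?_eq_getElem h2]
  rw [List.getD_eq_getElem?_getD, List.getElem?_eq_getElem h2]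
  rfl

lemma drop_cons_getD (l : List String) (i : Nat) (h : i < l.length) :
    l.drop i = l.getD i "" :: l.drop (i+1) := by
  rw [List.drop_eq_getElem_cons h, List.getD_eq_getElem?_getD, List.getElem?_eq_getElem h]
  rfl

lemma slice_one (l : List String) (i : Nat) (h : i < l.length) :
    (l.drop i).take (i + 1 - i) = [l.getD i ""] := by
  rw [drop_cons_getD l i h]
  simp

lemma fB_35 (gs : List (List String)) : pvFB gs (35 : Int) = [] := by
  cases gs with
  | nil => rfl
  | cons g gs =>
    simp only [pvFB, pvBSLIndex]
    cases hidx : pvBSuitLevels.idxOf? (g.getD 0 "") with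
    | some m =>
      have h35 := (slidx_some hidx).1
      simp [show ((m : Nat) : Int) < 35 by exact_mod_cast h35]
    | none => simp

lemma grid_eq : ∀ (fuel i : Nat), 35 - i ≤ fuel → i ≤ 35 → ∀ (split : List (List String)) (j : Nat) (acc : List Char),
    ∃ d, pvAGrid split pvBSuitLevels i j acc
          = acc ++ pvFB (split.drop j) (i : Int) ++ List.replicate d '0'
        ∧ (pvFB (split.drop j) (i : Int)).length + d ≤ 9 * (35 - i) := by
  intro fuel
  induction fuel with
  | zero =>
    intro i hf hi split j acc
    have h35 : i = 35 := by omega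
    subst h35
    rw [pvAGrid, dif_neg (by omega)]
    exact ⟨0, by simp [fB_35], by simp [fB_35]⟩
  | succ n ih =>
    intro i hf hi split j acc
    by_cases hi35 : i < 35
    case neg =>
      have h35 : i = 35 := by omega
      subst h35
      rw [pvAGrid, dif_neg (by omega)]
      exact ⟨0, by simp [fB_35], by simp [fB_35]⟩
    case pos =>
    cases hdrop : split.drop j with
    | nil =>
      have hj : split.length ≤ j := List.drop_eq_nil_iff.mp hdrop
      rw [pvAGrid, dif_pos hi35, if_neg (by omega)]
      exact ⟨0, by simp [pvFB], by simp [pvFB]⟩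
    | cons g gs =>
      have hj : j < split.length := by
        by_contra hc
        rw [List.drop_eq_nil_iff.mpr (by omega)] at hdrop
        cases hdrop
      have hgetj : split.getD j [] = g := by
        rw [List.getD_eq_getElem?_getD]
        have h0 : (split.drop j)[0]? = some g := by rw [hdrop]; rfl
        rw [List.getElem?_drop] at h0
        simp at h0
        simp [h0]
      have hdrop1 : split.drop (j+1) = gs := by
        have : split.drop (j+1) = (split.drop j).drop 1 := by
          rw [List.drop_drop]
        rw [this, hdrop]
        rfl
      rw [pvAGrid, dif_pos hi35, if_pos hj, hgetj]
      cases hidx : pvBSuitLevels.idxOf? (g.getD 0 "") with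
      | some m =>
        obtain ⟨hm35, hgm, hmin⟩ := slidx_some hidx
        rcases lt_trichotomy i m with hlt | heq | hgt
        · -- i < m : emit 9 zeros, same group
          rw [if_neg (fun he => hmin i hlt he.symm)]
          obtain ⟨d, hrec, hb⟩ := ih (i+1) (by omega) (by omega) split j (acc ++ List.replicate 9 '0')
          rw [hdrop] at hrec hb
          have e0 : pvFB (g :: gs) ((i : Nat) : Int)
              = List.replicate (9 * (m - i)) '0' ++ pvBEnc g ++ pvFB gs ((m : Int) + 1) := by
            simp only [pvFB, pvBSLIndex, hidx]
            rw [if_neg (by push_cast; omega)]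
            have ht : (((m : Nat) : Int) - ((i : Nat) : Int)).toNat = m - i := by omega
            rw [ht]
          have e1 : pvFB (g :: gs) (((i+1) : Nat) : Int)
              = List.replicate (9 * (m - (i+1))) '0' ++ pvBEnc g ++ pvFB gs ((m : Int) + 1) := by
            simp only [pvFB, pvBSLIndex, hidx]
            rw [if_neg (by push_cast; omega)]
            have ht : (((m : Nat) : Int) - (((i+1) : Nat) : Int)).toNat = m - (i+1) := by omega
            rw [ht]
          refine ⟨d, ?_, ?_⟩
          · rw [hrec, e0, e1]
            have h9 : 9 * (m - i) = 9 + 9 * (m - (i+1)) := by omega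
            rw [h9, List.replicate_add]
            simp [List.append_assoc]
          · rw [e0]
            rw [e1] at hb
            simp only [List.length_append, List.length_replicate, enc_len] at hb ⊢
            omega
        · -- i = m : match
          subst heq
          rw [if_pos hgm.symm]
          obtain ⟨d, hrec, hb⟩ := ih (i+1) (by omega) (by omega) split (j+1) (acc ++ pvAContrs g)
          rw [hdrop1] at hrec hb
          refine ⟨d, ?_, ?_⟩
          · rw [hrec, enc_eq]
            simp only [pvFB, pvBSLIndex, hidx]
            rw [if_neg (by omega)]
            have ht : (((i:Nat):Int) - ((i:Nat):Int)).toNat = 0 := by omega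
            rw [ht]
            push_cast
            try simp [List.append_assoc]
          · simp only [pvFB, pvBSLIndex, hidx]
            rw [if_neg (by omega)]
            have ht : (((i:Nat):Int) - ((i:Nat):Int)).toNat = 0 := by omega
            rw [ht]
            push_cast at hb ⊢
            simp only [List.length_append, List.length_replicate, enc_len] at hb ⊢
            simp only [mul_zero, List.nil_append, List.length_nil]
            omega
        · -- m < i : dead
          have hne : g.getD 0 "" ≠ pvBSuitLevels.getD i "" := by
            intro he
            have hi' : pvBSuitLevels.getD i "" = pvBSuitLevels[i]'(by rw [pvSL_len]; omega) := sl_getD i (by omega)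
            have hm' : pvBSuitLevels.getD m "" = pvBSuitLevels[m]'(by rw [pvSL_len]; omega) := sl_getD m (by omega)
            have : pvBSuitLevels[m]'(by rw [pvSL_len]; omega) = pvBSuitLevels[i]'(by rw [pvSL_len]; omega) := by
              rw [← hm', ← hi', hgm, he]
            have := (List.Nodup.getElem_inj_iff pvSL_nodup).mp this
            omega
          rw [if_neg hne]
          obtain ⟨d, hrec, hb⟩ := ih (i+1) (by omega) (by omega) split j (acc ++ List.replicate 9 '0')
          rw [hdrop] at hrec hb
          have hdead1 : pvFB (g :: gs) ((i+1 : Nat) : Int) = [] := by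
            simp only [pvFB, pvBSLIndex, hidx]
            rw [if_pos (by push_cast; omega)]
          have hdead0 : pvFB (g :: gs) ((i : Nat) : Int) = [] := by
            simp only [pvFB, pvBSLIndex, hidx]
            rw [if_pos (by push_cast; omega)]
          refine ⟨d + 9, ?_, ?_⟩
          · rw [hrec, hdead1, hdead0]
            simp only [List.append_nil, List.nil_append, List.append_assoc, ← List.replicate_add]
            rw [Nat.add_comm d 9]
          · rw [hdead1] at hb
            rw [hdead0]
            simp at hb ⊢
            omega
      | none =>
        have hnm := slidx_none hidx
        have hne : g.getD 0 "" ≠ pvBSuitLevels.getD i "" := fun he => hnm i (by omega) he.symm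
        rw [if_neg hne]
        obtain ⟨d, hrec, hb⟩ := ih (i+1) (by omega) (by omega) split j (acc ++ List.replicate 9 '0')
        rw [hdrop] at hrec hb
        have hdead1 : pvFB (g :: gs) ((i+1 : Nat) : Int) = [] := by
          simp only [pvFB, pvBSLIndex, hidx]
          rw [if_pos (by push_cast; omega)]
        have hdead0 : pvFB (g :: gs) ((i : Nat) : Int) = [] := by
          simp only [pvFB, pvBSLIndex, hidx]
          rw [if_pos (by push_cast; omega)]
        refine ⟨d + 9, ?_, ?_⟩
        · rw [hrec, hdead1, hdead0]
          simp only [List.append_nil, List.nil_append, List.append_assoc, ← List.replicate_add]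
          rw [Nat.add_comm d 9]
        · rw [hdead1] at hb
          rw [hdead0]
          simp at hb ⊢
          omega

lemma splitLoop_eq (cut : List String) : ∀ (fuel i start : Nat) (split : List (List String)),
    cut.length - i ≤ fuel → start < i → i ≤ cut.length →
    (pvASplitLoop cut cut.length i start split).1 ++ [cut.drop (pvASplitLoop cut cut.length i start split).2]
      = split ++ pvGrp ((cut.drop start).take (i - start)) (cut.drop i)
    ∧ (pvASplitLoop cut cut.length i start split).2 < cut.length := by
  intro fuel
  induction fuel with
  | zero =>
    intro i start split hf hsi hil
    have hie : i = cut.length := by omega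
    subst hie
    rw [pvASplitLoop, dif_neg (by omega)]
    constructor
    · simp only [List.drop_length, pvGrp]
      rw [List.take_of_length_le (by simp)]
    · omega
  | succ n ih =>
    intro i start split hf hsi hil
    by_cases hie : i = cut.length
    · subst hie
      rw [pvASplitLoop, dif_neg (by omega)]
      constructor
      · simp only [List.drop_length, pvGrp]
        rw [List.take_of_length_le (by simp)]
      · omega
    · have hil2 : i < cut.length := by omega
      rw [pvASplitLoop, dif_pos hil2]
      have hgrp : pvGrp ((cut.drop start).take (i - start)) (cut.drop i)
          = if pvDigitHead (cut.getD i "") then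
              (cut.drop start).take (i - start) :: pvGrp [cut.getD i ""] (cut.drop (i+1))
            else pvGrp ((cut.drop start).take (i - start) ++ [cut.getD i ""]) (cut.drop (i+1)) := by
        rw [drop_cons_getD cut i hil2]
        rfl
      by_cases hd : pvDigitHead (cut.getD i "")
      · rw [if_pos hd]
        obtain ⟨h1, h2⟩ := ih (i+1) i (split ++ [(cut.drop start).take (i - start)]) (by omega) (by omega) (by omega)
        refine ⟨?_, h2⟩
        rw [h1, slice_one cut i hil2, hgrp, if_pos hd]
        simp
      · rw [if_neg hd]
        obtain ⟨h1, h2⟩ := ih (i+1) start split (by omega) (by omega) (by omega)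
        refine ⟨?_, h2⟩
        rw [h1, slice_extend cut start i (by omega) hil2, hgrp, if_neg hd]

lemma walk_eq (rest : List String) : ∀ (fuel i g : Nat) (cur : Int) (parts : List Char),
    rest.length + 1 - i ≤ fuel → g < i → i ≤ rest.length →
    pvBWalk rest i g cur parts
      = parts ++ pvFB (pvGrp ((rest.drop g).take (i - g)) (rest.drop i)) cur := by
  intro fuel
  induction fuel with
  | zero => intro i g cur parts hf hgi hil; omega
  | succ n ih =>
    intro i g cur parts hf hgi hil
    have hh : ((rest.drop g).take (i - g)).getD 0 "" = rest.getD g "" := slice_head rest g i hgi hil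
    by_cases hie : i = rest.length
    · subst hie
      rw [pvBWalk, dif_pos (by omega), if_pos (Or.inl rfl)]
      simp only [List.drop_length, pvGrp, pvFB, hh]
      by_cases hlt : pvBSLIndex (rest.getD g "") < cur
      · rw [if_pos hlt, if_pos hlt]
        simp
      · rw [if_neg hlt, if_neg hlt]
        rw [pvBWalk, dif_neg (by omega)]
        simp [List.append_assoc]
    · have hil2 : i < rest.length := by omega
      have hgrp : pvGrp ((rest.drop g).take (i - g)) (rest.drop i)
          = if pvDigitHead (rest.getD i "") then
              (rest.drop g).take (i - g) :: pvGrp [rest.getD i ""] (rest.drop (i+1))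
            else pvGrp ((rest.drop g).take (i - g) ++ [rest.getD i ""]) (rest.drop (i+1)) := by
        rw [drop_cons_getD rest i hil2]
        rfl
      by_cases hd : pvDigitHead (rest.getD i "")
      · rw [pvBWalk, dif_pos (by omega), if_pos (Or.inr hd), hgrp, if_pos hd]
        by_cases hlt : pvBSLIndex (rest.getD g "") < cur
        · rw [if_pos hlt]
          simp only [pvFB, hh]
          rw [if_pos hlt]
          simp
        · rw [if_neg hlt]
          rw [ih (i+1) i (pvBSLIndex (rest.getD g "") + 1) _ (by omega) (by omega) (by omega)]
          rw [slice_one rest i hil2]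
          simp only [pvFB, hh]
          rw [if_neg hlt]
          simp [List.append_assoc]
      · rw [pvBWalk, dif_pos (by omega), if_neg (by simp only [Bool.not_eq_true] at hd; simp [hie, -List.getD_eq_getElem?_getD, hd]), hgrp, if_neg hd]
        rw [ih (i+1) g cur parts (by omega) (by omega) (by omega)]
        rw [slice_extend rest g i (by omega) hil2]

-- ===== VERDICT (by name: the statement is the Claim_ definition above) =====
theorem auc_onehot_spec : Claim_equal_auc_onehot := by
  intro auc _ _
  have hopen : pvAOpen auc = pvBOpenLoop auc (min 3 auc.length) 0 (List.replicate 3 '0') 0 :=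
    openLoop_eq auc (min 3 auc.length) (min 3 auc.length) 0 _ 0 (by omega) (by simp)
  have holen : (pvBOpenLoop auc (min 3 auc.length) 0 (List.replicate 3 '0') 0).1.length = 3 := by
    rw [openLoop_len auc (min 3 auc.length) (min 3 auc.length) 0 _ 0 (by omega) (by simp)]
    simp
  unfold Spec_auc_onehot auc_onehot auc_onehot_alt pvASplit
  dsimp only
  rw [hopen, pvASL_eq]
  set o := pvBOpenLoop auc (min 3 auc.length) 0 (List.replicate 3 '0') 0 with ho
  set cut := auc.drop o.2 with hcutdef
  by_cases hcut : cut = []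
  · -- no tokens after the opening cut: both sides are opening ++ 315 zeros
    rw [hcut]
    rw [pvASplitLoop, dif_neg (by simp)]
    dsimp only
    rw [if_neg (show ¬ (List.drop 0 ([] : List String) ≠ []) by simp)]
    have hgrid0 : pvAGrid [] pvBSuitLevels 0 0 o.1 = o.1 := by
      rw [pvAGrid, dif_pos (by omega)]
      simp
    rw [hgrid0]
    rw [if_pos (show o.1.length < 318 by rw [holen]; omega)]
    have hbw : (if ([] : List String) ≠ [] then pvBWalk [] 1 0 0 [] else []) = [] := by simp
    rw [hbw]
    simp only [List.append_nil, holen]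
  · -- at least one token after the cut
    have hlen1 : 1 ≤ cut.length := by
      cases hc : cut with
      | nil => exact absurd hc hcut
      | cons a l => simp
    obtain ⟨hsplit, hlt⟩ := splitLoop_eq cut cut.length 1 0 [] (by omega) (by omega) (by omega)
    simp only [List.nil_append, List.drop_zero] at hsplit
    rw [if_pos (show List.drop (pvASplitLoop cut cut.length 1 0 []).2 cut ≠ [] from by
      simp only [ne_eq, List.drop_eq_nil_iff]; omega)]
    rw [hsplit]
    rw [if_pos hcut]
    rw [walk_eq cut cut.length 1 0 0 [] (by omega) (by omega) (by omega)]
    simp only [List.nil_append, List.drop_zero]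
    obtain ⟨d, hrec, hb⟩ := grid_eq 35 0 (by omega) (by omega)
      (pvGrp ((cut.drop 0).take (1 - 0)) (cut.drop 1)) 0 o.1
    simp only [List.drop_zero, Nat.cast_zero] at hrec hb
    rw [hrec]
    set F := pvFB (pvGrp (cut.take (1 - 0)) (cut.drop 1)) 0 with hF
    have hFd : F.length + d ≤ 315 := by omega
    have hlenrec : (o.1 ++ F ++ List.replicate d '0').length = 3 + F.length + d := by
      simp [holen]
      omega
    by_cases hpad : (o.1 ++ F ++ List.replicate d '0').length < 318
    · rw [if_pos hpad]
      rw [hlenrec] at hpad ⊢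
      rw [List.append_assoc, List.append_assoc, List.append_assoc]
      congr 1
      congr 1
      rw [← List.replicate_add]
      congr 1
      simp [holen]
      omega
    · rw [if_neg hpad]
      rw [hlenrec] at hpad
      have hd : d = 315 - F.length := by omega
      rw [hd]
      simp only [List.length_append, holen]
      congr 3
      omega
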